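-- pv_equiv track=rewrite | github.com/IAmTheTable/ChemistrySimulator | backend/app/engine/nomenclature.py | _tokenize_formula
-- ===== SOURCE A (Python) =====
-- def _tokenize_formula(formula: str) -> list[str]:
--     """Tokenize a chemical formula into elements, numbers, and parens."""
--     tokens: list[str] = []
--     i = 0
--     while i < len(formula):
--         if formula[i] == "(":
--             tokens.append("(")
--             i += 1
--         elif formula[i] == ")":
--             tokens.append(")")
--             i += 1
--         elif formula[i].isupper():
--             symbol = formula[i]
--             i += 1
--             while i < len(formula) and formula[i].islower():
--                 symbol += formula[i]
--                 i += 1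
--             tokens.append(symbol)
--         elif formula[i].isdigit():
--             num_str = ""
--             while i < len(formula) and formula[i].isdigit():
--                 num_str += formula[i]
--                 i += 1
--             tokens.append(num_str)
--         else:
--             i += 1
--     return tokens
-- ===== SOURCE B (Python) =====
-- def _tokenize_formula(formula: str) -> list[str]:
--     """Tokenize a chemical formula into elements, numbers, and parens.
--
--     Single pass over the characters with a small state machine instead of an
--     index with nested scanning loops: state says whether the last emitted
--     token is an element still open for lowercase letters (1), a number still
--     open for digits (2), or closed (0)."""
--     tokens: list[str] = []
--     state = 0
--     for c in formula:
--         if c == "(" or c == ")":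
--             tokens.append(c)
--             state = 0
--         elif c.isupper():
--             tokens.append(c)
--             state = 1
--         elif c.islower():
--             if state == 1:
--                 tokens[-1] += c
--             else:
--                 state = 0
--         elif c.isdigit():
--             if state == 2:
--                 tokens[-1] += c
--             else:
--                 tokens.append(c)
--                 state = 2
--         else:
--             state = 0
--     return tokens
-- ===== Notes on version B (the rewrite author's own statement) =====
-- stated objective: alternative
-- what changed: Replaces A's manual index with nested while-loops (inner scans building run strings by repeated concatenation) by a single character-by-character fold with an explicit 3-valued state (closed / open element / open number) deciding whether a char extends the last token or starts a new one.
import Mathlib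
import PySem

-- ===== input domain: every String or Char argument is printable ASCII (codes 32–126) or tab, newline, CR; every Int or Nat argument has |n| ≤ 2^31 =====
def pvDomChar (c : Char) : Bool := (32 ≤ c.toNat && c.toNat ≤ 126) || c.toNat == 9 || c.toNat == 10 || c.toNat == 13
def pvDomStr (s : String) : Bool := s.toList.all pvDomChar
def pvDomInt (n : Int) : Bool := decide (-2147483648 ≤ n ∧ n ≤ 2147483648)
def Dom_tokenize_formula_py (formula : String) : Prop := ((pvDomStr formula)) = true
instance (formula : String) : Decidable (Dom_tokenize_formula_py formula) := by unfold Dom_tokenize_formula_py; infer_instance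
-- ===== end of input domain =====

-- B replaces A's index with nested while-loops by a single character-by-character
-- pass with an explicit 3-valued state (alternative decomposition, same cost).

-- ===== PORT A =====

-- inner while loop of the isupper branch: symbol += formula[i] while islower
def pvTakeLower (s : String) : List Char → String × List Char
  | [] => (s, [])
  | c :: rest => if c.isLower then pvTakeLower (s.push c) rest else (s, c :: rest)

-- inner while loop of the isdigit branch: num_str += formula[i] while isdigit
def pvTakeDigits (s : String) : List Char → String × List Char
  | [] => (s, [])
  | c :: rest => if c.isDigit then pvTakeDigits (s.push c) rest else (s, c :: rest)

theorem pvTakeLower_len (s : String) (cs : List Char) : (pvTakeLower s cs).2.length ≤ cs.length := by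
  induction cs generalizing s with
  | nil => simp [pvTakeLower]
  | cons c rest ih =>
    simp only [pvTakeLower]
    split
    · exact Nat.le_trans (ih _) (Nat.le_succ _)
    · simp

theorem pvTakeDigits_len (s : String) (cs : List Char) : (pvTakeDigits s cs).2.length ≤ cs.length := by
  induction cs generalizing s with
  | nil => simp [pvTakeDigits]
  | cons c rest ih =>
    simp only [pvTakeDigits]
    split
    · exact Nat.le_trans (ih _) (Nat.le_succ _)
    · simp

-- main while loop of A over the remaining characters, accumulating tokens
def pvTokLoop : List Char → List String → List String
  | [], tokens => tokens
  | c :: rest, tokens =>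
    if c = '(' then pvTokLoop rest (tokens ++ ["("])
    else if c = ')' then pvTokLoop rest (tokens ++ [")"])
    else if c.isUpper then
      let p := pvTakeLower (String.ofList [c]) rest
      pvTokLoop p.2 (tokens ++ [p.1])
    else if c.isDigit then
      let p := pvTakeDigits "" (c :: rest)
      pvTokLoop p.2 (tokens ++ [p.1])
    else pvTokLoop rest tokens
termination_by cs _ => cs.length
decreasing_by
  · simp
  · simp
  · exact Nat.lt_succ_of_le (pvTakeLower_len _ _)
  · rename_i hd
    simp only [pvTakeDigits, hd, if_true]
    exact Nat.lt_succ_of_le (pvTakeDigits_len _ _)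
  · simp

def tokenize_formula_py (formula : String) : List String :=
  pvTokLoop formula.toList []

-- ===== PORT B =====

-- one step of B's state machine: state 0 = closed, 1 = open element, 2 = open number
def pvTokStep (st : List String × Nat) (c : Char) : List String × Nat :=
  if c = '(' ∨ c = ')' then (String.ofList [c] :: st.1, 0)
  else if c.isUpper then (String.ofList [c] :: st.1, 1)
  else if c.isLower then
    if st.2 = 1 then ((match st.1 with | t :: ts => t.push c :: ts | [] => []), 1)
    else (st.1, 0)
  else if c.isDigit then
    if st.2 = 2 then ((match st.1 with | t :: ts => t.push c :: ts | [] => []), 2)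
    else (String.ofList [c] :: st.1, 2)
  else (st.1, 0)

-- B keeps the token list reversed while folding and reverses it at the end
def tokenize_formula_py_alt (formula : String) : List String :=
  (formula.toList.foldl pvTokStep ([], 0)).1.reverse

-- ===== PRECONDITION & SPEC =====
def Spec_tokenize_formula_py (formula : String) (out : List String) : Prop := out = tokenize_formula_py_alt formula
instance (formula : String) (out : List String) : Decidable (Spec_tokenize_formula_py formula out) := by unfold Spec_tokenize_formula_py; infer_instance

-- ===== CLAIM (what is proved, stated in full; the proofs are below) =====
def Claim_equal_tokenize_formula_py : Prop := ∀ (formula : String), Dom_tokenize_formula_py formula → Spec_tokenize_formula_py formula (tokenize_formula_py formula)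

-- ===== LEMMAS AND PROOFS =====

theorem lower_classes (c : Char) (h : c.isLower = true) :
    c ≠ '(' ∧ c ≠ ')' ∧ c.isUpper = false := by
  refine ⟨?_, ?_, ?_⟩
  · rintro rfl; simp at h
  · rintro rfl; simp at h
  · simp [Char.isLower, Char.isUpper, UInt32.le_iff_toNat_le] at *; omega

theorem digit_classes (c : Char) (h : c.isDigit = true) :
    c ≠ '(' ∧ c ≠ ')' ∧ c.isUpper = false ∧ c.isLower = false := by
  refine ⟨?_, ?_, ?_, ?_⟩
  · rintro rfl; simp at h
  · rintro rfl; simp at h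
  · simp [Char.isDigit, Char.isUpper, UInt32.le_iff_toNat_le] at *; omega
  · simp [Char.isDigit, Char.isLower, UInt32.le_iff_toNat_le] at *; omega

theorem pvTokStep_lower1 (c : Char) (h : c.isLower = true) (t : String) (ts : List String) :
    pvTokStep (t :: ts, 1) c = (t.push c :: ts, 1) := by
  obtain ⟨h1, h2, h3⟩ := lower_classes c h
  simp [pvTokStep, h, h1, h2, h3]

theorem pvTokStep_digit2 (c : Char) (h : c.isDigit = true) (t : String) (ts : List String) :
    pvTokStep (t :: ts, 2) c = (t.push c :: ts, 2) := by
  obtain ⟨h1, h2, h3, h4⟩ := digit_classes c h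
  simp [pvTokStep, h, h1, h2, h3, h4]

-- state 1 behaves like state 0 on a character that is not lowercase
theorem pvTokStep_state1_eq (c : Char) (h : c.isLower = false) (x : List String) :
    pvTokStep (x, 1) c = pvTokStep (x, 0) c := by
  simp only [pvTokStep, h]
  split_ifs <;> first | rfl | omega

-- state 2 behaves like state 0 on a character that is not a digit
theorem pvTokStep_state2_eq (c : Char) (h : c.isDigit = false) (x : List String) :
    pvTokStep (x, 2) c = pvTokStep (x, 0) c := by
  simp only [pvTokStep, h]
  split_ifs <;> first | rfl | omega | simp_all

-- folding in state 1 consumes exactly the lowercase run, pushing onto the head token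
theorem foldl_lowRun (cs : List Char) (t : String) (acc : List String) :
    cs.foldl pvTokStep (t :: acc, 1)
      = (pvTakeLower t cs).2.foldl pvTokStep ((pvTakeLower t cs).1 :: acc, 1) := by
  induction cs generalizing t with
  | nil => simp [pvTakeLower]
  | cons c rest ih =>
    by_cases h : c.isLower = true
    · simp only [pvTakeLower, h, if_true, List.foldl_cons, pvTokStep_lower1 c h]
      exact ih (t.push c)
    · have h' : c.isLower = false := by simpa using h
      simp only [pvTakeLower, h', Bool.false_eq_true, if_false]

-- folding in state 2 consumes exactly the digit run, pushing onto the head token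
theorem foldl_digRun (cs : List Char) (t : String) (acc : List String) :
    cs.foldl pvTokStep (t :: acc, 2)
      = (pvTakeDigits t cs).2.foldl pvTokStep ((pvTakeDigits t cs).1 :: acc, 2) := by
  induction cs generalizing t with
  | nil => simp [pvTakeDigits]
  | cons c rest ih =>
    by_cases h : c.isDigit = true
    · simp only [pvTakeDigits, h, if_true, List.foldl_cons, pvTokStep_digit2 c h]
      exact ih (t.push c)
    · have h' : c.isDigit = false := by simpa using h
      simp only [pvTakeDigits, h', Bool.false_eq_true, if_false]

-- the remainder after a lowercase run does not start with a lowercase letter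
theorem pvTakeLower_rest (s : String) (cs : List Char) :
    (pvTakeLower s cs).2 = [] ∨
    ∃ d ds, (pvTakeLower s cs).2 = d :: ds ∧ d.isLower = false := by
  induction cs generalizing s with
  | nil => left; simp [pvTakeLower]
  | cons c rest ih =>
    by_cases h : c.isLower = true
    · simpa [pvTakeLower, h] using ih (s.push c)
    · have h' : c.isLower = false := by simpa using h
      right; exact ⟨c, rest, by simp [pvTakeLower, h'], h'⟩

theorem pvTakeDigits_rest (s : String) (cs : List Char) :
    (pvTakeDigits s cs).2 = [] ∨
    ∃ d ds, (pvTakeDigits s cs).2 = d :: ds ∧ d.isDigit = false := by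
  induction cs generalizing s with
  | nil => left; simp [pvTakeDigits]
  | cons c rest ih =>
    by_cases h : c.isDigit = true
    · simpa [pvTakeDigits, h] using ih (s.push c)
    · have h' : c.isDigit = false := by simpa using h
      right; exact ⟨c, rest, by simp [pvTakeDigits, h'], h'⟩

-- after a completed run, state 1 (resp. 2) may be replaced by state 0
theorem foldl_close1 (cs : List Char) (x : List String)
    (h : cs = [] ∨ ∃ d ds, cs = d :: ds ∧ d.isLower = false) :
    (cs.foldl pvTokStep (x, 1)).1 = (cs.foldl pvTokStep (x, 0)).1 := by
  rcases h with rfl | ⟨d, ds, rfl, hd⟩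
  · rfl
  · simp only [List.foldl_cons, pvTokStep_state1_eq d hd]

theorem foldl_close2 (cs : List Char) (x : List String)
    (h : cs = [] ∨ ∃ d ds, cs = d :: ds ∧ d.isDigit = false) :
    (cs.foldl pvTokStep (x, 2)).1 = (cs.foldl pvTokStep (x, 0)).1 := by
  rcases h with rfl | ⟨d, ds, rfl, hd⟩
  · rfl
  · simp only [List.foldl_cons, pvTokStep_state2_eq d hd]

-- main invariant: A's loop with the accumulated tokens equals B's fold from state 0
theorem pvMain : ∀ (n : Nat) (cs : List Char) (acc : List String), cs.length ≤ n →
    pvTokLoop cs acc.reverse = ((cs.foldl pvTokStep (acc, 0)).1).reverse := by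
  intro n
  induction n with
  | zero =>
    intro cs acc h
    have : cs = [] := List.eq_nil_of_length_eq_zero (Nat.le_zero.mp h)
    subst this; simp [pvTokLoop]
  | succ n ih =>
    intro cs acc h
    match cs with
    | [] => simp [pvTokLoop]
    | c :: rest =>
      have hr : rest.length ≤ n := Nat.lt_succ_iff.mp h
      by_cases hp : c = '('
      · subst hp
        have : pvTokLoop ('(' :: rest) acc.reverse = pvTokLoop rest (("(" : String) :: acc).reverse := by
          simp [pvTokLoop]
        rw [this, ih rest _ hr]
        simp [pvTokStep]
      · by_cases hq : c = ')'
        · subst hq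
          have : pvTokLoop (')' :: rest) acc.reverse = pvTokLoop rest ((")" : String) :: acc).reverse := by
            simp [pvTokLoop]
          rw [this, ih rest _ hr]
          simp [pvTokStep]
        · by_cases hu : c.isUpper = true
          · -- element token: A consumes the lowercase run at once, B char by char in state 1
            have hA : pvTokLoop (c :: rest) acc.reverse
                = pvTokLoop (pvTakeLower (String.ofList [c]) rest).2
                    ((pvTakeLower (String.ofList [c]) rest).1 :: acc).reverse := by
              simp [pvTokLoop, hp, hq, hu]
            rw [hA, ih _ _ (Nat.le_trans (pvTakeLower_len _ _) hr)]
            have hB : (c :: rest).foldl pvTokStep (acc, 0)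
                = rest.foldl pvTokStep (String.ofList [c] :: acc, 1) := by
              simp [pvTokStep, hp, hq, hu]
            rw [hB, foldl_lowRun]
            rw [foldl_close1 _ _ (pvTakeLower_rest _ _)]
          · by_cases hd : c.isDigit = true
            · -- number token: A consumes the digit run (re-reading c), B in state 2
              have hdig : pvTakeDigits "" (c :: rest) = pvTakeDigits (String.ofList [c]) rest := by
                simp [pvTakeDigits, hd]; rfl
              have hA : pvTokLoop (c :: rest) acc.reverse
                  = pvTokLoop (pvTakeDigits (String.ofList [c]) rest).2
                      ((pvTakeDigits (String.ofList [c]) rest).1 :: acc).reverse := by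
                simp [pvTokLoop, hp, hq, hu, hd, hdig]
              rw [hA, ih _ _ (Nat.le_trans (pvTakeDigits_len _ _) hr)]
              have hB : (c :: rest).foldl pvTokStep (acc, 0)
                  = rest.foldl pvTokStep (String.ofList [c] :: acc, 2) := by
                have hl := (digit_classes c hd).2.2.2
                simp [pvTokStep, hp, hq, hu, hd, hl]
              rw [hB, foldl_digRun]
              rw [foldl_close2 _ _ (pvTakeDigits_rest _ _)]
            · -- skipped character: both sides ignore it (B may pass through its isLower branch)
              have hA : pvTokLoop (c :: rest) acc.reverse = pvTokLoop rest acc.reverse := by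
                simp [pvTokLoop, hp, hq, hu, hd]
              have hB : pvTokStep (acc, 0) c = (acc, 0) := by
                simp [pvTokStep, hp, hq, hu, hd]
              rw [hA, ih rest acc hr]
              simp [hB]

-- ===== VERDICT (by name: the statement is the Claim_ definition above) =====
theorem tokenize_formula_py_spec : Claim_equal_tokenize_formula_py := by
  intro formula _
  unfold Spec_tokenize_formula_py tokenize_formula_py tokenize_formula_py_alt
  have := pvMain formula.toList.length formula.toList [] (Nat.le_refl _)
  simpa using this
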